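-- pv_equiv track=rewrite | github.com/Office-Studio-Jj/biblioteca-dga | sub_agentes/lector_notas_arancel.py | _seccion_de_capitulo
-- ===== SOURCE A (Python) =====
-- _SECCIONES = {
--     "I":     ("01-05", "Animales vivos y productos del reino animal"),
--     "II":    ("06-14", "Productos del reino vegetal"),
--     "III":   ("15",    "Grasas y aceites animales, vegetales o microbianos"),
--     "IV":    ("16-24", "Productos de las industrias alimentarias; bebidas, tabaco"),
--     "V":     ("25-27", "Productos minerales"),
--     "VI":    ("28-38", "Productos de las industrias químicas"),
--     "VII":   ("39-40", "Plástico y caucho y sus manufacturas"),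
--     "VIII":  ("41-43", "Pieles, cueros, peletería y manufacturas"),
--     "IX":    ("44-46", "Madera, carbón vegetal, corcho, manufacturas de espartería"),
--     "X":     ("47-49", "Pasta de madera, papel, cartón, productos editoriales"),
--     "XI":    ("50-63", "Materias textiles y sus manufacturas"),
--     "XII":   ("64-67", "Calzado, sombreros, paraguas, plumas, flores artificiales"),
--     "XIII":  ("68-70", "Manufacturas de piedra, yeso, cerámica, vidrio"),
--     "XIV":   ("71",    "Perlas, piedras preciosas, metales preciosos, bisutería"),
--     "XV":    ("72-83", "Metales comunes y sus manufacturas"),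
--     "XVI":   ("84-85", "Máquinas, aparatos, material eléctrico"),
--     "XVII":  ("86-89", "Material de transporte"),
--     "XVIII": ("90-92", "Instrumentos y aparatos de óptica, relojería, música"),
--     "XIX":   ("93",    "Armas, municiones y sus partes"),
--     "XX":    ("94-96", "Mercancías y productos diversos"),
--     "XXI":   ("97",    "Objetos de arte y antigüedades"),
-- }
--
-- def _seccion_de_capitulo(cap: str) -> tuple[str, str]:
--     cap_num = int(cap)
--     for sec, (rango, nombre) in _SECCIONES.items():
--         if "-" in rango:
--             ini, fin = rango.split("-")
--             if int(ini) <= cap_num <= int(fin):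
--                 return sec, nombre
--         else:
--             if cap_num == int(rango):
--                 return sec, nombre
--     return "?", "(desconocida)"
-- ===== SOURCE B (Python) =====
-- _SECCIONES = {
--     "I":     ("01-05", "Animales vivos y productos del reino animal"),
--     "II":    ("06-14", "Productos del reino vegetal"),
--     "III":   ("15",    "Grasas y aceites animales, vegetales o microbianos"),
--     "IV":    ("16-24", "Productos de las industrias alimentarias; bebidas, tabaco"),
--     "V":     ("25-27", "Productos minerales"),
--     "VI":    ("28-38", "Productos de las industrias químicas"),
--     "VII":   ("39-40", "Plástico y caucho y sus manufacturas"),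
--     "VIII":  ("41-43", "Pieles, cueros, peletería y manufacturas"),
--     "IX":    ("44-46", "Madera, carbón vegetal, corcho, manufacturas de espartería"),
--     "X":     ("47-49", "Pasta de madera, papel, cartón, productos editoriales"),
--     "XI":    ("50-63", "Materias textiles y sus manufacturas"),
--     "XII":   ("64-67", "Calzado, sombreros, paraguas, plumas, flores artificiales"),
--     "XIII":  ("68-70", "Manufacturas de piedra, yeso, cerámica, vidrio"),
--     "XIV":   ("71",    "Perlas, piedras preciosas, metales preciosos, bisutería"),
--     "XV":    ("72-83", "Metales comunes y sus manufacturas"),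
--     "XVI":   ("84-85", "Máquinas, aparatos, material eléctrico"),
--     "XVII":  ("86-89", "Material de transporte"),
--     "XVIII": ("90-92", "Instrumentos y aparatos de óptica, relojería, música"),
--     "XIX":   ("93",    "Armas, municiones y sus partes"),
--     "XX":    ("94-96", "Mercancías y productos diversos"),
--     "XXI":   ("97",    "Objetos de arte y antigüedades"),
-- }
--
-- # Expand the range strings ONCE at module load into a flat chapter -> (section, name) table.
-- _MAPA_CAP = {}
-- for _sec, (_rango, _nombre) in _SECCIONES.items():
--     _parts = _rango.split("-")
--     for _n in range(int(_parts[0]), int(_parts[-1]) + 1):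
--         _MAPA_CAP[_n] = (_sec, _nombre)
--
-- def _seccion_de_capitulo(cap: str) -> tuple[str, str]:
--     return _MAPA_CAP.get(int(cap), ("?", "(desconocida)"))
-- ===== Notes on version B (the rewrite author's own statement) =====
-- stated objective: faster
-- what changed: B expands the section range strings once at module load into a flat chapter->(section,name) dict, replacing A's per-call scan over all 21 sections with range splitting/parsing by a single dict lookup.
import Mathlib
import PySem

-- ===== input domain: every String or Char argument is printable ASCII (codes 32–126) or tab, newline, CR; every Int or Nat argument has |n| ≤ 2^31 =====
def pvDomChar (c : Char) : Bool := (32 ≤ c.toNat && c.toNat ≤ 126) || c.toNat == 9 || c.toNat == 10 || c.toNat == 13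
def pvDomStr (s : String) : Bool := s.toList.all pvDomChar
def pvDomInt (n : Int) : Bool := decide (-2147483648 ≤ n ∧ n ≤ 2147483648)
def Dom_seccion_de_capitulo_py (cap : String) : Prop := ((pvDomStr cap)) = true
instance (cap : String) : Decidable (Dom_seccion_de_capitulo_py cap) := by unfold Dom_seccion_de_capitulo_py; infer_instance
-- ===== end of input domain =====

-- B expands the range strings once at module load into a flat chapter -> (section, name) dict,
-- so the per-call scan over sections disappears: one O(1) table lookup (objective: faster, constant-factor).


-- the module constant _SECCIONES as an (insertion-ordered) list of (sec, (rango, nombre))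
def pvSecciones : List (String × String × String) :=
  [("I",     "01-05", "Animales vivos y productos del reino animal"),
   ("II",    "06-14", "Productos del reino vegetal"),
   ("III",   "15",    "Grasas y aceites animales, vegetales o microbianos"),
   ("IV",    "16-24", "Productos de las industrias alimentarias; bebidas, tabaco"),
   ("V",     "25-27", "Productos minerales"),
   ("VI",    "28-38", "Productos de las industrias químicas"),
   ("VII",   "39-40", "Plástico y caucho y sus manufacturas"),
   ("VIII",  "41-43", "Pieles, cueros, peletería y manufacturas"),
   ("IX",    "44-46", "Madera, carbón vegetal, corcho, manufacturas de espartería"),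
   ("X",     "47-49", "Pasta de madera, papel, cartón, productos editoriales"),
   ("XI",    "50-63", "Materias textiles y sus manufacturas"),
   ("XII",   "64-67", "Calzado, sombreros, paraguas, plumas, flores artificiales"),
   ("XIII",  "68-70", "Manufacturas de piedra, yeso, cerámica, vidrio"),
   ("XIV",   "71",    "Perlas, piedras preciosas, metales preciosos, bisutería"),
   ("XV",    "72-83", "Metales comunes y sus manufacturas"),
   ("XVI",   "84-85", "Máquinas, aparatos, material eléctrico"),
   ("XVII",  "86-89", "Material de transporte"),
   ("XVIII", "90-92", "Instrumentos y aparatos de óptica, relojería, música"),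
   ("XIX",   "93",    "Armas, municiones y sus partes"),
   ("XX",    "94-96", "Mercancías y productos diversos"),
   ("XXI",   "97",    "Objetos de arte y antigüedades")]

-- ===== PORT A =====
-- A's for-loop over _SECCIONES.items(): split "ini-fin" ranges, test membership.
-- The inner int(ini)/int(fin) always succeed on the literal data; a parse/unpack failure branch
-- is unreachable and ports to the default return (it never fires on pvSecciones).
def pvALoop (n : Int) : List (String × String × String) → String × String
  | [] => ("?", "(desconocida)")
  | (sec, rango, nombre) :: rest =>
    if PySem.Str.isIn "-" rango then
      match PySem.Str.split? rango "-" with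
      | some [ini, fin] =>
        match PySem.Int.ofStr? ini, PySem.Int.ofStr? fin with
        | some i, some f => if i ≤ n ∧ n ≤ f then (sec, nombre) else pvALoop n rest
        | _, _ => ("?", "(desconocida)")   -- unreachable on pvSecciones
      | _ => ("?", "(desconocida)")        -- unreachable on pvSecciones
    else
      match PySem.Int.ofStr? rango with
      | some r => if n = r then (sec, nombre) else pvALoop n rest
      | none => ("?", "(desconocida)")     -- unreachable on pvSecciones

def seccion_de_capitulo_py (cap : String) : String × String :=
  match PySem.Int.ofStr? cap with
  | some n => pvALoop n pvSecciones
  | none => ("?", "(desconocida)")  -- int(cap) raises ValueError here: excluded by Pre_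

-- ===== PORT B =====
-- _MAPA_CAP: built once by expanding each range into its chapters (B's module-load loop).
def pvMapaCap : PySem.Dict Int (String × String) :=
  pvSecciones.foldl (fun d p =>
    let parts := (PySem.Str.split? p.2.1 "-").getD []
    let lo := (PySem.Int.ofStr? (PySem.List.pyGetD parts 0 "")).getD 0
    let hi := (PySem.Int.ofStr? (PySem.List.pyGetD parts (-1) "")).getD 0
    (PySem.List.pyRange lo (hi + 1) 1).foldl (fun d n => d.insert n (p.1, p.2.2)) d)
    PySem.Dict.empty

def seccion_de_capitulo_py_alt (cap : String) : String × String :=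
  match PySem.Int.ofStr? cap with
  | some n => pvMapaCap.getD n ("?", "(desconocida)")
  | none => ("?", "(desconocida)")  -- int(cap) raises ValueError here: excluded by Pre_

-- ===== PRECONDITION & SPEC =====
-- Pre_ excludes exactly the strings int() rejects, where both A and B raise ValueError.
def Pre_seccion_de_capitulo_py (cap : String) : Prop := (PySem.Int.ofStr? cap).isSome = true
instance (cap : String) : Decidable (Pre_seccion_de_capitulo_py cap) := by unfold Pre_seccion_de_capitulo_py; infer_instance
def pvWitness_seccion_de_capitulo_py : String := "07"

def Spec_seccion_de_capitulo_py (cap : String) (out : String × String) : Prop := out = seccion_de_capitulo_py_alt cap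
instance (cap : String) (out : String × String) : Decidable (Spec_seccion_de_capitulo_py cap out) := by unfold Spec_seccion_de_capitulo_py; infer_instance

-- ===== CLAIM (what is proved, stated in full; the proofs are below) =====
def Claim_equal_seccion_de_capitulo_py : Prop := ∀ (cap : String), Dom_seccion_de_capitulo_py cap → Pre_seccion_de_capitulo_py cap → Spec_seccion_de_capitulo_py cap (seccion_de_capitulo_py cap)

-- ===== LEMMAS AND PROOFS =====
set_option maxRecDepth 100000
set_option maxHeartbeats 2000000

-- every entry of _SECCIONES parses cleanly and its chapter bounds lie in [1, 97]
def pvBoundsOK (e : String × String × String) : Bool :=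
  if PySem.Str.isIn "-" e.2.1 then
    match PySem.Str.split? e.2.1 "-" with
    | some [ini, fin] =>
      match PySem.Int.ofStr? ini, PySem.Int.ofStr? fin with
      | some i, some f => decide (1 ≤ i) && decide (f ≤ 97)
      | _, _ => false
    | _ => false
  else
    match PySem.Int.ofStr? e.2.1 with
    | some r => decide (1 ≤ r) && decide (r ≤ 97)
    | none => false

-- out-of-range chapters fall through A's whole loop
theorem aLoop_default (n : Int) (hn : n < 1 ∨ 97 < n) :
    ∀ L : List (String × String × String), (∀ e ∈ L, pvBoundsOK e = true) →
      pvALoop n L = ("?", "(desconocida)") := by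
  intro L
  induction L with
  | nil => intro _; rfl
  | cons e rest ih =>
    intro hall
    obtain ⟨sec, rango, nombre⟩ := e
    have he := hall _ List.mem_cons_self
    have hrest : ∀ e ∈ rest, pvBoundsOK e = true := fun e h => hall e (List.mem_cons_of_mem _ h)
    unfold pvBoundsOK at he
    unfold pvALoop
    cases hin : PySem.Str.isIn "-" rango <;> simp only [hin, if_true, if_false, Bool.false_eq_true] at he ⊢
    · cases hof : PySem.Int.ofStr? rango <;> simp only [hof] at he ⊢
      rename_i r
      simp only [Bool.and_eq_true, decide_eq_true_eq] at he
      rw [if_neg (by omega)]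
      exact ih hrest
    · cases hsp : PySem.Str.split? rango "-" <;> simp only [hsp] at he ⊢
      rename_i l
      match l with
      | [] => simp at he
      | [_] => simp at he
      | _ :: _ :: _ :: _ => simp at he
      | [ini, fin] =>
        cases h1 : PySem.Int.ofStr? ini <;> cases h2 : PySem.Int.ofStr? fin <;> simp only [h1, h2] at he ⊢
        simp only [Bool.and_eq_true, decide_eq_true_eq] at he
        rw [if_neg (by omega)]
        exact ih hrest

-- the two core computations agree for every chapter number
theorem pv_core_eq (n : Int) :
    pvALoop n pvSecciones = pvMapaCap.getD n ("?", "(desconocida)") := by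
  by_cases h : 1 ≤ n ∧ n ≤ 97
  · obtain ⟨h1, h2⟩ := h
    interval_cases n <;> decide
  · have hb : pvMapaCap.getD n ("?", "(desconocida)") = ("?", "(desconocida)") := by
      apply PySem.Dict.getD_of_not_contains
      rw [PySem.Dict.contains_eq_decide_mem_keys]
      have hk : pvMapaCap.keys = [(1:Int), (2:Int), (3:Int), (4:Int), (5:Int), (6:Int), (7:Int), (8:Int), (9:Int), (10:Int), (11:Int), (12:Int), (13:Int), (14:Int), (15:Int), (16:Int), (17:Int), (18:Int), (19:Int), (20:Int), (21:Int), (22:Int), (23:Int), (24:Int), (25:Int), (26:Int), (27:Int), (28:Int), (29:Int), (30:Int), (31:Int), (32:Int), (33:Int), (34:Int), (35:Int), (36:Int), (37:Int), (38:Int), (39:Int), (40:Int), (41:Int), (42:Int), (43:Int), (44:Int), (45:Int), (46:Int), (47:Int), (48:Int), (49:Int), (50:Int), (51:Int), (52:Int), (53:Int), (54:Int), (55:Int), (56:Int), (57:Int), (58:Int), (59:Int), (60:Int), (61:Int), (62:Int), (63:Int), (64:Int), (65:Int), (66:Int), (67:Int), (68:Int), (69:Int), (70:Int), (71:Int), (72:Int),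 (73:Int), (74:Int), (75:Int), (76:Int), (77:Int), (78:Int), (79:Int), (80:Int), (81:Int), (82:Int), (83:Int), (84:Int), (85:Int), (86:Int), (87:Int), (88:Int), (89:Int), (90:Int), (91:Int), (92:Int), (93:Int), (94:Int), (95:Int), (96:Int), (97:Int)] := by decide
      rw [hk]
      simp only [decide_eq_false_iff_not, List.mem_cons, List.not_mem_nil, or_false]
      omega
    rw [hb]
    exact aLoop_default n (by omega) pvSecciones (by decide)

-- ===== VERDICT (by name: the statement is the Claim_ definition above) =====
theorem seccion_de_capitulo_py_spec : Claim_equal_seccion_de_capitulo_py := by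
  intro cap _ hpre
  unfold Spec_seccion_de_capitulo_py seccion_de_capitulo_py seccion_de_capitulo_py_alt
  cases h : PySem.Int.ofStr? cap with
  | none => simp [Pre_seccion_de_capitulo_py, h] at hpre
  | some n => exact pv_core_eq n
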